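-- pv_equiv track=rewrite | github.com/PillowGit/aoc | src/2025/1.py | sln2
-- ===== SOURCE A (Python) =====
-- def sln2(input):
--   start = 50
--   ans = 0
--   for line in input:
--     prev = start
--     while abs(line) > 99:
--       if line > 0:
--         line -= 100
--       else:
--         line += 100
--       ans += 1
--     start += line
--     if prev != 0 and (start < 0 or start > 99 or start == 0):
--       ans += 1
--     start %= 100
--   return ans
-- ===== SOURCE B (Python) =====
-- def sln2(input):
--   start = 50
--   ans = 0
--   for line in input:
--     prev = start
--     ans += abs(line) // 100
--     r = line % 100 if line >= 0 else -((-line) % 100)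
--     start += r
--     if prev != 0 and (start < 0 or start > 99 or start == 0):
--       ans += 1
--     start %= 100
--   return ans
-- ===== Notes on version B (the rewrite author's own statement) =====
-- stated objective: faster
-- what changed: The inner while-loop that repeatedly adds/subtracts 100 is replaced by arithmetic: ans += abs(line)//100 and the signed (truncated) remainder of line mod 100, making each list element O(1) instead of O(|value|/100).
import Mathlib
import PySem

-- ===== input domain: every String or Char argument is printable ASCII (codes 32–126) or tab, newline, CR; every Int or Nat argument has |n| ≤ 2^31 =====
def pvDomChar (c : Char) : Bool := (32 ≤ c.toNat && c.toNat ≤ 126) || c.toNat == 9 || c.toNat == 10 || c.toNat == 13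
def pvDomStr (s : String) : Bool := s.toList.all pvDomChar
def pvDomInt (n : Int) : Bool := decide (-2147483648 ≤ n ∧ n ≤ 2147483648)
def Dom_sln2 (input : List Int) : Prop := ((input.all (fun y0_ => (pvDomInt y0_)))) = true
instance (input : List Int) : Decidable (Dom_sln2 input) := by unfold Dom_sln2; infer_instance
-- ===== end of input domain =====

-- B replaces A's per-100 while-loop by division/remainder arithmetic (O(1) per element): faster.

-- ===== PORT A =====
-- the `while abs(line) > 99` loop, carrying (line, ans)
def sln2While (line ans : Int) : Int × Int :=
  if 99 < line.natAbs then
    if 0 < line then sln2While (line - 100) (ans + 1)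
    else sln2While (line + 100) (ans + 1)
  else (line, ans)
termination_by line.natAbs
decreasing_by all_goals omega

def sln2 (input : List Int) : Int :=
  (input.foldl (fun (st : Int × Int) line =>
      let prev := st.1
      let p := sln2While line st.2
      let start := prev + p.1
      let ans := if prev ≠ 0 ∧ (start < 0 ∨ 99 < start ∨ start = 0) then p.2 + 1 else p.2
      (PySem.Int.mod start 100, ans)) (50, 0)).2

-- ===== PORT B =====
def sln2_alt (input : List Int) : Int :=
  (input.foldl (fun (st : Int × Int) line =>
      let prev := st.1
      let ans0 := st.2 + PySem.Int.floordiv |line| 100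
      let r := if 0 ≤ line then PySem.Int.mod line 100 else -(PySem.Int.mod (-line) 100)
      let start := prev + r
      let ans := if prev ≠ 0 ∧ (start < 0 ∨ 99 < start ∨ start = 0) then ans0 + 1 else ans0
      (PySem.Int.mod start 100, ans)) (50, 0)).2

-- ===== PRECONDITION & SPEC =====
def Spec_sln2 (input : List Int) (out : Int) : Prop := out = sln2_alt input
instance (input : List Int) (out : Int) : Decidable (Spec_sln2 input out) := by unfold Spec_sln2; infer_instance

-- ===== CLAIM (what is proved, stated in full; the proofs are below) =====
def Claim_equal_sln2 : Prop := ∀ (input : List Int), Dom_sln2 input → Spec_sln2 input (sln2 input)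

-- ===== LEMMAS AND PROOFS =====

-- A's while-loop computes the signed truncated remainder and abs(line)//100 extra wraps
theorem sln2While_eq (line ans : Int) :
    sln2While line ans =
      ((if 0 ≤ line then PySem.Int.mod line 100 else -(PySem.Int.mod (-line) 100)),
       ans + PySem.Int.floordiv |line| 100) := by
  fun_induction sln2While line ans with
  | case1 line ans h hp ih =>
    rw [ih]
    have h100 : (0:Int) < 100 := by norm_num
    simp only [PySem.Int.mod_eq_emod_of_pos h100, PySem.Int.floordiv_eq_ediv_of_pos h100,
      Prod.mk.injEq, Int.abs_eq_natAbs]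
    constructor <;> first | (split_ifs <;> omega) | omega
  | case2 line ans h hp ih =>
    rw [ih]
    have h100 : (0:Int) < 100 := by norm_num
    simp only [PySem.Int.mod_eq_emod_of_pos h100, PySem.Int.floordiv_eq_ediv_of_pos h100,
      Prod.mk.injEq, Int.abs_eq_natAbs]
    constructor <;> first | (split_ifs <;> omega) | omega
  | case3 line ans h =>
    have h100 : (0:Int) < 100 := by norm_num
    simp only [PySem.Int.mod_eq_emod_of_pos h100, PySem.Int.floordiv_eq_ediv_of_pos h100,
      Prod.mk.injEq, Int.abs_eq_natAbs]
    constructor <;> first | (split_ifs <;> omega) | omega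

theorem sln2_step_eq :
    (fun (st : Int × Int) line =>
      let prev := st.1
      let p := sln2While line st.2
      let start := prev + p.1
      let ans := if prev ≠ 0 ∧ (start < 0 ∨ 99 < start ∨ start = 0) then p.2 + 1 else p.2
      ((PySem.Int.mod start 100, ans) : Int × Int)) =
    (fun (st : Int × Int) line =>
      let prev := st.1
      let ans0 := st.2 + PySem.Int.floordiv |line| 100
      let r := if 0 ≤ line then PySem.Int.mod line 100 else -(PySem.Int.mod (-line) 100)
      let start := prev + r
      let ans := if prev ≠ 0 ∧ (start < 0 ∨ 99 < start ∨ start = 0) then ans0 + 1 else ans0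
      ((PySem.Int.mod start 100, ans) : Int × Int)) := by
  funext st line
  simp only [sln2While_eq]

-- ===== VERDICT (by name: the statement is the Claim_ definition above) =====
theorem sln2_spec : Claim_equal_sln2 := by
  intro input _
  unfold Spec_sln2 sln2 sln2_alt
  rw [sln2_step_eq]
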